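-- pv_equiv track=rewrite | github.com/nguyenchiemminhvu/DSA | Problems/PeopleWhoseListOfFavoriteCompaniesIsNotSubsetOfAnotherList/main.py | peopleIndexes
-- ===== SOURCE A (Python) =====
-- from typing import List
--
-- def peopleIndexes(favoriteCompanies: List[List[str]]) -> List[int]:
--     set_companies = [set(favoriteCompanies[i]) for i in range(0, len(favoriteCompanies))]
--
--     is_subset = []
--     for i in range(0, len(set_companies)):
--         for j in range(0, len(set_companies)):
--             if (i != j):
--                 if (set_companies[i].issubset(set_companies[j])):
--                     is_subset.append(i)
--                     break
--
--     res = []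
--     for i in range(0, len(set_companies)):
--         if (i not in is_subset):
--             res.append(i)
--     return res
-- ===== SOURCE B (Python) =====
-- from typing import List
--
-- def peopleIndexes(favoriteCompanies: List[List[str]]) -> List[int]:
--     n = len(favoriteCompanies)
--     sets = [set(fc) for fc in favoriteCompanies]
--     # person indices ordered by the size of their company set
--     order = sorted(range(n), key=lambda j: len(sets[j]))
--     res = []
--     for i in range(n):
--         si = sets[i]
--         dominated = False
--         for j in reversed(order):  # largest sets first
--             if len(sets[j]) < len(si):
--                 break  # every remaining candidate is smaller: it cannot contain si
--             if j != i and si.issubset(sets[j]):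
--                 dominated = True
--                 break
--         if not dominated:
--             res.append(i)
--     return res
-- ===== Notes on version B (the rewrite author's own statement) =====
-- stated objective: alternative
-- what changed: Replaces A's blind all-pairs subset scan plus quadratic membership filter with a size-sorted candidate scan: indices are sorted by set cardinality once, and each person is tested only against candidates of equal-or-greater cardinality (largest first, breaking off as soon as sizes drop below), collecting survivors directly in ascending order.
import Mathlib
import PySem

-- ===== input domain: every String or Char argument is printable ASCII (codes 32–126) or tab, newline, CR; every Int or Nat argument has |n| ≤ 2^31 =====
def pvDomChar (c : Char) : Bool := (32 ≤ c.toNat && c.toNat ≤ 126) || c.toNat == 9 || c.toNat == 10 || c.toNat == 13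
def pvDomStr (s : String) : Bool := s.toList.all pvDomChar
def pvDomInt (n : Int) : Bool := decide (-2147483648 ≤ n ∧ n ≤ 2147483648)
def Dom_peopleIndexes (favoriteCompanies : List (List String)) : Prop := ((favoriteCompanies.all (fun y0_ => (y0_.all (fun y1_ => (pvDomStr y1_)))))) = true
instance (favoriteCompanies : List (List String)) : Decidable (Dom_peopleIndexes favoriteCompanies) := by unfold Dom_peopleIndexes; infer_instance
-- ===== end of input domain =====

-- B replaces A's blind all-pairs subset scan (plus list-membership filter) with a size-sorted,
-- largest-first candidate scan that breaks off once candidates get smaller (objective: alternative).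


-- ===== PORT A =====
-- inner 'for j' loop of A with its break: True at the first j with i != j and issubset
def pvAInner (sets : List (PySem.Set String)) (i : Int) : List Int → Bool
  | [] => false
  | j :: rest =>
    if i ≠ j then
      if PySem.Set.issubset (PySem.List.pyGetD sets i PySem.Set.empty)
          (PySem.List.pyGetD sets j PySem.Set.empty) then true
      else pvAInner sets i rest
    else pvAInner sets i rest

def peopleIndexes (favoriteCompanies : List (List String)) : List Int :=
  -- every index fetched by the Python is in range, so the total pyGetD is exact here
  let setCompanies := (PySem.List.pyRange 0 (PySem.List.len favoriteCompanies)).map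
      (fun i => PySem.Set.ofList (PySem.List.pyGetD favoriteCompanies i []))
  let isSubset := (PySem.List.pyRange 0 (PySem.List.len setCompanies)).foldl
      (fun acc i =>
        if pvAInner setCompanies i (PySem.List.pyRange 0 (PySem.List.len setCompanies))
        then acc ++ [i] else acc) []
  (PySem.List.pyRange 0 (PySem.List.len setCompanies)).foldl
      (fun acc i => if isSubset.contains i then acc else acc ++ [i]) []

-- ===== PORT B =====
-- B's inner scan over the reversed size-sorted order, with both breaks
def pvBScan (sets : List (PySem.Set String)) (si : PySem.Set String) (i : Int) : List Int → Bool
  | [] => false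
  | j :: rest =>
    let sj := PySem.List.pyGetD sets j PySem.Set.empty
    if PySem.Set.len sj < PySem.Set.len si then false
    else if (j != i) && PySem.Set.issubset si sj then true
    else pvBScan sets si i rest

def peopleIndexes_alt (favoriteCompanies : List (List String)) : List Int :=
  let n := PySem.List.len favoriteCompanies
  let sets := favoriteCompanies.map PySem.Set.ofList
  let order := PySem.List.sorted (PySem.List.pyRange 0 n)
      (fun j => PySem.Set.len (PySem.List.pyGetD sets j PySem.Set.empty))
  (PySem.List.pyRange 0 n).foldl
      (fun res i =>
        let si := PySem.List.pyGetD sets i PySem.Set.empty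
        if pvBScan sets si i order.reverse then res else res ++ [i]) []

-- ===== PRECONDITION & SPEC =====
def Spec_peopleIndexes (favoriteCompanies : List (List String)) (out : List Int) : Prop := out = peopleIndexes_alt favoriteCompanies
instance (favoriteCompanies : List (List String)) (out : List Int) : Decidable (Spec_peopleIndexes favoriteCompanies out) := by unfold Spec_peopleIndexes; infer_instance

-- ===== CLAIM (what is proved, stated in full; the proofs are below) =====
def Claim_equal_peopleIndexes : Prop := ∀ (favoriteCompanies : List (List String)), Dom_peopleIndexes favoriteCompanies → Spec_peopleIndexes favoriteCompanies (peopleIndexes favoriteCompanies)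

-- ===== LEMMAS AND PROOFS =====

-- anything fetched from a list of Set.ofList's (default Set.empty included) is Nodup
lemma pvGetD_nodup (fc : List (List String)) (j : Int) :
    (PySem.List.pyGetD (fc.map PySem.Set.ofList) j PySem.Set.empty).Nodup := by
  unfold PySem.List.pyGetD
  cases h : PySem.List.pyGet? (fc.map PySem.Set.ofList) j with
  | none => simp [PySem.Set.empty]
  | some v =>
    have hv : v ∈ fc.map PySem.Set.ofList := by
      unfold PySem.List.pyGet? at h
      rcases Option.bind_eq_some_iff.mp h with ⟨k, _, hk⟩
      exact List.mem_of_getElem? hk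
    rcases List.mem_map.mp hv with ⟨l, _, rfl⟩
    exact PySem.Set.nodup_ofList l

lemma pvIssubset_iff (s t : PySem.Set String) : PySem.Set.issubset s t = true ↔ s ⊆ t := by
  simp [PySem.Set.issubset, List.all_eq_true, List.subset_def]

-- a set with fewer elements cannot contain si (sets are Nodup lists)
lemma pvIssubset_false (si t : PySem.Set String) (hsi : si.Nodup)
    (hlt : PySem.Set.len t < PySem.Set.len si) :
    ((si.issubset t : Bool)) = false := by
  by_contra h
  have hs : si ⊆ t := pvIssubset_iff si t |>.mp (by simpa using h)
  have := (List.subperm_of_subset hsi hs).length_le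
  simp [PySem.Set.len] at hlt
  omega

-- A's inner loop is an 'any'
lemma pvAInner_eq_any (sets : List (PySem.Set String)) (i : Int) (js : List Int) :
    pvAInner sets i js = js.any (fun j => (j != i) &&
      PySem.Set.issubset (PySem.List.pyGetD sets i PySem.Set.empty)
        (PySem.List.pyGetD sets j PySem.Set.empty)) := by
  induction js with
  | nil => simp [pvAInner]
  | cons j rest ih =>
    by_cases h : i = j
    · rw [pvAInner, if_neg (by simp [h]), List.any_cons, show (j != i) = false by simp [h], ih]
      simp
    · have hne : (j != i) = true := by simp [bne]; omega
      rw [pvAInner, if_pos h, List.any_cons, hne]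
      split <;> simp_all

-- B's pruned scan over a size-descending candidate list is the same 'any'
lemma pvBScan_eq_any (sets : List (PySem.Set String)) (si : PySem.Set String) (i : Int)
    (js : List Int)
    (hsi : si.Nodup)
    (hnd : ∀ j ∈ js, (PySem.List.pyGetD sets j PySem.Set.empty).Nodup)
    (hpw : js.Pairwise (fun a b =>
      PySem.Set.len (PySem.List.pyGetD sets b PySem.Set.empty) ≤
      PySem.Set.len (PySem.List.pyGetD sets a PySem.Set.empty))) :
    pvBScan sets si i js = js.any (fun j => (j != i) &&
      PySem.Set.issubset si (PySem.List.pyGetD sets j PySem.Set.empty)) := by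
  induction js with
  | nil => simp [pvBScan]
  | cons j rest ih =>
    rcases List.pairwise_cons.mp hpw with ⟨hhead, htail⟩
    by_cases hlt : PySem.Set.len (PySem.List.pyGetD sets j PySem.Set.empty) <
        PySem.Set.len si
    · rw [pvBScan, if_pos hlt]
      symm
      rw [List.any_eq_false]
      intro b hb
      have hfb : PySem.Set.issubset si (PySem.List.pyGetD sets b PySem.Set.empty) = false := by
        rcases List.mem_cons.mp hb with rfl | hbr
        · exact pvIssubset_false si _ hsi hlt
        · exact pvIssubset_false si _ hsi (lt_of_le_of_lt (hhead b hbr) hlt)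
      rw [hfb, Bool.and_false]
      exact Bool.false_ne_true
    · rw [pvBScan, if_neg hlt, List.any_cons]
      split
      · simp_all
      · next hc =>
        rw [ih (fun b hb => hnd b (List.mem_cons_of_mem _ hb)) htail,
          Bool.not_eq_true _ |>.mp hc, Bool.false_or]

-- the two foldl shapes are filters
lemma pvFoldl_if_not (l : List Int) (p : Int → Bool) :
    l.foldl (fun acc i => if p i then acc else acc ++ [i]) [] = l.filter (fun i => !p i) := by
  rw [show (fun (acc : List Int) i => if p i then acc else acc ++ [i])
      = (fun acc i => if (!p i) = true then acc ++ [(fun x => x) i] else acc) from by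
    funext acc i; cases h : p i <;> simp]
  rw [PySem.List.foldl_append_if]
  simp

lemma pvFoldl_if_pos (l : List Int) (p : Int → Bool) :
    l.foldl (fun acc i => if p i then acc ++ [i] else acc) [] = l.filter p := by
  rw [show (fun (acc : List Int) i => if p i then acc ++ [i] else acc)
      = (fun acc i => if p i = true then acc ++ [(fun x => x) i] else acc) from rfl]
  rw [PySem.List.foldl_append_if]
  simp

-- both ports are the same filter over range(n)
lemma pvA_char (fc : List (List String)) :
    peopleIndexes fc = (PySem.List.pyRange 0 (PySem.List.len fc)).filter
      (fun i => !((PySem.List.pyRange 0 (PySem.List.len fc)).any (fun j => (j != i) &&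
        PySem.Set.issubset
          (PySem.List.pyGetD (fc.map PySem.Set.ofList) i PySem.Set.empty)
          (PySem.List.pyGetD (fc.map PySem.Set.ofList) j PySem.Set.empty)))) := by
  unfold peopleIndexes
  have hsc : (PySem.List.pyRange 0 (PySem.List.len fc)).map
      (fun i => PySem.Set.ofList (PySem.List.pyGetD fc i [])) = fc.map PySem.Set.ofList := by
    have h := congrArg (List.map PySem.Set.ofList) (PySem.List.map_pyGetD_pyRange_zero fc [])
    rw [List.map_map] at h
    exact h
  have hlen : PySem.List.len (fc.map PySem.Set.ofList) = PySem.List.len fc := by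
    simp [PySem.List.len]
  simp only [hsc, hlen, pvFoldl_if_pos, pvFoldl_if_not]
  apply List.filter_congr
  intro i hi
  congr 1
  have hcont : ((PySem.List.pyRange 0 (PySem.List.len fc)).filter
      (fun k => pvAInner (fc.map PySem.Set.ofList) k
        (PySem.List.pyRange 0 (PySem.List.len fc)))).contains i
      = pvAInner (fc.map PySem.Set.ofList) i (PySem.List.pyRange 0 (PySem.List.len fc)) := by
    rw [Bool.eq_iff_iff]
    simp only [List.contains_iff_mem, List.mem_filter]
    exact ⟨fun h => h.2, fun h => ⟨hi, h⟩⟩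
  rw [hcont, pvAInner_eq_any]

lemma pvB_char (fc : List (List String)) :
    peopleIndexes_alt fc = (PySem.List.pyRange 0 (PySem.List.len fc)).filter
      (fun i => !((PySem.List.pyRange 0 (PySem.List.len fc)).any (fun j => (j != i) &&
        PySem.Set.issubset
          (PySem.List.pyGetD (fc.map PySem.Set.ofList) i PySem.Set.empty)
          (PySem.List.pyGetD (fc.map PySem.Set.ofList) j PySem.Set.empty)))) := by
  unfold peopleIndexes_alt
  simp only [pvFoldl_if_not]
  apply List.filter_congr
  intro i hi
  congr 1
  rw [pvBScan_eq_any _ _ _ _ (pvGetD_nodup fc i) (fun j _ => pvGetD_nodup fc j)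
    (by rw [List.pairwise_reverse]; exact PySem.List.sorted_pairwise _ _)]
  exact ((List.reverse_perm _).trans (PySem.List.sorted_perm _ _ _)).any_eq

-- ===== VERDICT (by name: the statement is the Claim_ definition above) =====
theorem peopleIndexes_spec : Claim_equal_peopleIndexes := by
  intro fc _
  show peopleIndexes fc = peopleIndexes_alt fc
  rw [pvA_char, pvB_char]
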